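-- pv_equiv track=rewrite | github.com/alastergrume/AcademyTOP | PART_2_Python_START/2024_02_19_Recursion/main.py | dissum
-- ===== SOURCE A (Python) =====
-- def dissum(list1):
--     if not list1:
--         return 0
--     else:
--         if list1[0] % 2 != 0:
--             return list1[0] - dissum(list1[1:])
--         else:
--             return dissum(list1[1:])
-- ===== SOURCE B (Python) =====
-- def dissum(list1):
--     result = 0
--     sign = 1
--     for x in list1:
--         if x % 2 != 0:
--             result += sign * x
--             sign = -sign
--     return result
-- ===== Notes on version B (the rewrite author's own statement) =====
-- stated objective: simpler
-- what changed: Replaced A's self-recursion with slicing by a single iterative pass that keeps a running result and an alternating sign for odd elements.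
import Mathlib
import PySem

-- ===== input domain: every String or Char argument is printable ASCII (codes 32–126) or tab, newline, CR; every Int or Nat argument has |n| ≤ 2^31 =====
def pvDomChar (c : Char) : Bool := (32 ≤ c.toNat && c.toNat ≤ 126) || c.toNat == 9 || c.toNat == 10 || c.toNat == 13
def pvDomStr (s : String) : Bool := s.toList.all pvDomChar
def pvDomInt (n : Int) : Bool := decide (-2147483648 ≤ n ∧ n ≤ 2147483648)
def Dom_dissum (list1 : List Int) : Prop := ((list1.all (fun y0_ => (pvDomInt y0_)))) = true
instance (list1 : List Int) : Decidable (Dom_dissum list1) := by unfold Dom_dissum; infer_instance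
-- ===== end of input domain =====

-- B replaces A's slicing recursion with one iterative fold carrying (result, sign); objective: simpler.


-- ===== PORT A =====
def dissum : List Int → Int
  | [] => 0
  | x :: xs =>            -- list1[0] = x, list1[1:] = xs
    if PySem.Int.mod x 2 ≠ 0 then x - dissum xs else dissum xs

-- ===== PORT B =====
def dissum_alt (list1 : List Int) : Int :=
  (list1.foldl
    (fun (p : Int × Int) x =>
      if PySem.Int.mod x 2 ≠ 0 then (p.1 + p.2 * x, -p.2) else p)
    (0, 1)).1

-- ===== PRECONDITION & SPEC =====
def Spec_dissum (list1 : List Int) (out : Int) : Prop := out = dissum_alt list1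
instance (list1 : List Int) (out : Int) : Decidable (Spec_dissum list1 out) := by unfold Spec_dissum; infer_instance

-- ===== CLAIM (what is proved, stated in full; the proofs are below) =====
def Claim_equal_dissum : Prop := ∀ (list1 : List Int), Dom_dissum list1 → Spec_dissum list1 (dissum list1)

-- ===== LEMMAS AND PROOFS =====
-- loop invariant: the fold started at (r, s) yields r + s * (A's result)
theorem dissum_alt_inv (l : List Int) (r s : Int) :
    (l.foldl
      (fun (p : Int × Int) x =>
        if PySem.Int.mod x 2 ≠ 0 then (p.1 + p.2 * x, -p.2) else p)
      (r, s)).1 = r + s * dissum l := by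
  induction l generalizing r s with
  | nil => simp [dissum]
  | cons x xs ih =>
    rw [List.foldl_cons, dissum]
    by_cases h : PySem.Int.mod x 2 ≠ 0
    · rw [if_pos h, if_pos h, ih]; ring
    · rw [if_neg h, if_neg h, ih]

-- ===== VERDICT (by name: the statement is the Claim_ definition above) =====
theorem dissum_spec : Claim_equal_dissum := by
  intro l _
  unfold Spec_dissum dissum_alt
  rw [dissum_alt_inv]
  ring
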